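-- pv_equiv track=rewrite | github.com/galug/2023-algorithm-study | level_4/muzi_eating_live.py | solution
-- ===== SOURCE A (Python) =====
-- import heapq
--
-- def solution(food_times: list, k: int) -> int:
--     answer = 0
--     heap = []
--     for food_idx, food_time in enumerate(food_times):
--         heapq.heappush(heap, [food_time, food_idx + 1])
--
--     prev_time = 0
--     food_length = len(food_times)
--
--     while heap:
--         food_time, food_idx = heapq.heappop(heap)
--         if (food_time - prev_time) * food_length <= k:
--             k -= (food_time - prev_time) * food_length
--             food_length -= 1
--             prev_time = food_time
--         else:
--             heap.append([food_time, food_idx])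
--             heap.sort(key=lambda x: x[1])
--             return heap[k % food_length][1]
--     return -1
-- ===== SOURCE B (Python) =====
-- def solution(food_times: list, k: int) -> int:
--     # No heap, no sort: binary-search the last fully finished "level" r (the unique
--     # r with eaten(r) <= k < eaten(r+1)), then index the surviving foods directly.
--     n = len(food_times)
--     if n == 0:
--         return -1
--
--     def eaten(r):  # total bites consumed once every food has been eaten down to level r
--         return sum(t if t < r else r for t in food_times)
--
--     if eaten(max(food_times)) <= k:
--         return -1
--     lo = min(min(food_times), k // n)
--     hi = max(food_times)
--     while hi - lo > 1:
--         mid = (lo + hi) // 2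
--         if eaten(mid) <= k:
--             lo = mid
--         else:
--             hi = mid
--     survivors = [i + 1 for i, t in enumerate(food_times) if t > lo]
--     return survivors[k - eaten(lo)]
-- ===== Notes on version B (the rewrite author's own statement) =====
-- stated objective: alternative
-- what changed: Replaces A's heap simulation (pop foods in time order, subtract one level per step, mutate a counter, re-sort at the end) with no ordering pass at all: binary-search the unique level r with eaten(r) <= k < eaten(r+1), where eaten(r) = sum(min(t, r)), then pick survivors[k - eaten(r)] from the foods with t > r, which are already in index order.
import Mathlib
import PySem

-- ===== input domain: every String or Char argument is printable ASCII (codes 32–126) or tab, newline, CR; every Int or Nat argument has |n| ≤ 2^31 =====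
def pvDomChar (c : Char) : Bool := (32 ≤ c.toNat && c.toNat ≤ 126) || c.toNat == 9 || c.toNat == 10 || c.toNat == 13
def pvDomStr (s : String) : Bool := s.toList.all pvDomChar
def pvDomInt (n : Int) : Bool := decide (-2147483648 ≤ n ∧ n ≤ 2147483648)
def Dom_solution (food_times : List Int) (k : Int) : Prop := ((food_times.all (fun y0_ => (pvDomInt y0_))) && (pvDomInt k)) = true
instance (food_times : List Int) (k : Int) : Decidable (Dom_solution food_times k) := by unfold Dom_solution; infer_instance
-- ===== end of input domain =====

-- B drops A's heap simulation entirely: it binary-searches the unique level r with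
-- eaten(r) <= k < eaten(r+1) (eaten(r) = sum of min(t, r)) and indexes the surviving
-- foods, which are already in index order; objective: a genuinely different algorithm.

-- ===== PORT A =====
-- Python's list comparison [t, i] < [t', i'] is lexicographic.
def pvLexLt (a b : Int × Int) : Bool := a.1 < b.1 || (a.1 == b.1 && a.2 < b.2)

-- heapq.heappop returns the lexicographically smallest [time, idx] of the heap; every pair
-- ever stored has a distinct index, so the popped element is uniquely determined and the
-- heap's internal layout is unobservable (the only other read is `heap.sort(key=x[1])` with
-- distinct keys, whose output depends only on the multiset).  The heap is therefore ported
-- as the list of its elements, heappush as append and heappop as removal of the (first)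
-- lexicographic minimum: exact on every state `solution` reaches.
def pvPopMin : (Int × Int) → List (Int × Int) → (Int × Int) × List (Int × Int)
  | x, [] => (x, [])
  | x, y :: ys =>
    let r := pvPopMin y ys
    if pvLexLt r.1 x then (r.1, x :: r.2) else (x, y :: ys)

lemma pvPopMin_length (x : Int × Int) (xs : List (Int × Int)) :
    (pvPopMin x xs).2.length = xs.length := by
  induction xs generalizing x with
  | nil => rfl
  | cons y ys ih =>
    simp only [pvPopMin]
    split
    · simp [ih y]
    · rfl

-- the `while heap:` loop of A; arguments: heap, prev_time, food_length, k
def solALoop : List (Int × Int) → Int → Int → Int → Int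
  | [], _, _, _ => -1
  | x :: xs, prev_time, food_length, k =>
    let p := (pvPopMin x xs).1
    let rest := (pvPopMin x xs).2
    if (p.1 - prev_time) * food_length ≤ k then
      solALoop rest p.1 (food_length - 1) (k - (p.1 - prev_time) * food_length)
    else
      -- heap.append([ft, fi]); heap.sort(key=lambda x: x[1]); return heap[k % food_length][1]
      -- (k % food_length is a valid index in every reachable call: food_length = heap size > 0,
      -- so pyGetD's default is never used)
      (PySem.List.pyGetD (PySem.List.sorted (rest ++ [p]) (fun q => q.2))
        (PySem.Int.mod k food_length) (0, 0)).2
termination_by h _ _ _ => h.length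
decreasing_by simp [pvPopMin_length]

def solution (food_times : List Int) (k : Int) : Int :=
  let heap := (PySem.List.enumerate food_times 0).map (fun q => (q.2, q.1 + 1))
  solALoop heap 0 (food_times.length : Int) k

-- ===== PORT B =====
-- total bites consumed once every food has been eaten down to level r:
-- sum(t if t < r else r for t in food_times)
def eatenTo (food_times : List Int) (r : Int) : Int :=
  food_times.foldl (fun acc t => acc + (if t < r then t else r)) 0

-- the `while hi - lo > 1:` binary search of Source B
def bsGo (food_times : List Int) (k lo hi : Int) : Int :=
  if 1 < hi - lo then
    let mid := PySem.Int.floordiv (lo + hi) 2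
    if eatenTo food_times mid ≤ k then bsGo food_times k mid hi
    else bsGo food_times k lo mid
  else lo
termination_by (hi - lo).toNat
decreasing_by
  · have h1 := (PySem.Int.le_floordiv_iff_mul_le (a := lo + hi) (b := 2) (q := lo + 1) (by omega)).mpr (by omega)
    omega
  · have h1 := (PySem.Int.floordiv_lt_iff_lt_mul (a := lo + hi) (b := 2) (q := hi) (by omega)).mpr (by omega)
    omega

def solution_alt (food_times : List Int) (k : Int) : Int :=
  if food_times.length = 0 then -1
  else
    -- the list is nonempty, so max?/min? below are `some …` and getD's default is never used
    let mx := (PySem.List.max? food_times (fun t => t)).getD 0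
    if eatenTo food_times mx ≤ k then -1
    else
      let lo0 := min ((PySem.List.min? food_times (fun t => t)).getD 0)
                     (PySem.Int.floordiv k (food_times.length : Int))
      let r := bsGo food_times k lo0 mx
      let survivors := ((PySem.List.enumerate food_times 0).filter
        (fun q => r < q.2)).map (fun q => q.1 + 1)
      -- k - eatenTo(r) is a valid nonnegative index (proved below): pyGetD's default is never used
      PySem.List.pyGetD survivors (k - eatenTo food_times r) 0

-- ===== PRECONDITION & SPEC =====
def Spec_solution (food_times : List Int) (k : Int) (out : Int) : Prop := out = solution_alt food_times k
instance (food_times : List Int) (k : Int) (out : Int) : Decidable (Spec_solution food_times k out) := by unfold Spec_solution; infer_instance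

-- ===== CLAIM (what is proved, stated in full; the proofs are below) =====
def Claim_equal_solution : Prop := ∀ (food_times : List Int) (k : Int), Dom_solution food_times k → Spec_solution food_times k (solution food_times k)

-- ===== LEMMAS AND PROOFS =====

-- proof-only helper: A's loop replayed on the time-sorted pair list
def walkGo : List (Int × Int) → Int → Int → Int
  | [], _, _ => -1
  | p :: rest, prev, k =>
    let t := p.1
    let m : Int := ((p :: rest).length : Int)
    let need := (t - prev) * m
    if k < need then
      (PySem.List.pyGetD (PySem.List.sorted (p :: rest) (fun q => q.2))
        (PySem.Int.mod k m) (0, 0)).2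
    else walkGo rest t (k - need)

-- the Prop form of pvLexLt
def lexP (a b : Int × Int) : Prop := a.1 < b.1 ∨ (a.1 = b.1 ∧ a.2 < b.2)

lemma pvLexLt_iff (a b : Int × Int) : pvLexLt a b = true ↔ lexP a b := by
  simp [pvLexLt, lexP]

lemma popMin_perm (x : Int × Int) (xs : List (Int × Int)) :
    (x :: xs).Perm ((pvPopMin x xs).1 :: (pvPopMin x xs).2) := by
  induction xs generalizing x with
  | nil => rfl
  | cons y ys ih =>
    simp only [pvPopMin]
    split
    · exact ((ih y).cons x).trans (List.Perm.swap _ _ _)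
    · rfl

lemma popMin_min (x : Int × Int) (xs : List (Int × Int)) :
    ∀ z ∈ x :: xs, ¬ lexP z (pvPopMin x xs).1 := by
  induction xs generalizing x with
  | nil =>
    intro z hz
    simp at hz
    subst hz
    simp only [pvPopMin, lexP]
    omega
  | cons y ys ih =>
    intro z hz
    simp only [pvPopMin]
    split
    · rename_i hlt
      rw [pvLexLt_iff] at hlt
      rcases List.mem_cons.mp hz with hzx | hz'
      · subst hzx
        simp only [lexP] at hlt ⊢
        omega
      · exact ih y z hz'
    · rename_i hnlt
      rw [Bool.not_eq_true] at hnlt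
      have hnm : ¬ lexP (pvPopMin y ys).1 x := by
        intro hc; rw [← pvLexLt_iff] at hc; simp [hnlt] at hc
      rcases List.mem_cons.mp hz with hzx | hz'
      · subst hzx; simp only [lexP]; omega
      · have h1 := ih y z hz'
        simp only [lexP] at h1 hnm ⊢
        omega

lemma pairwise_snd_nodup {l : List (Int × Int)}
    (h : l.Pairwise (fun a b => a.2 < b.2)) : (l.map Prod.snd).Nodup := by
  rw [List.Nodup, List.pairwise_map]
  exact h.imp (fun hab => ne_of_lt hab)

-- stability of PySem's sort: sorting a snd-strictly-increasing list by fst gives a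
-- lexicographically strictly increasing list
lemma insertBy_pairwise_lex (acc : List (Int × Int)) (x : Int × Int)
    (hp : acc.Pairwise lexP) (hs : ∀ a ∈ acc, a.2 < x.2) :
    (PySem.List.insertBy (fun a b => decide (a.1 < b.1)) x acc).Pairwise lexP := by
  induction acc with
  | nil => simp [PySem.List.insertBy]
  | cons y ys ih =>
    simp only [PySem.List.insertBy]
    split
    · rename_i hlt
      simp only [decide_eq_true_eq] at hlt
      rcases hp with _ | ⟨hy, hys⟩
      constructor
      · intro z hz
        rcases List.mem_cons.mp hz with hzy | hz'
        · subst hzy; exact Or.inl hlt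
        · have := hy z hz'
          simp only [lexP] at this ⊢
          omega
      · exact List.Pairwise.cons hy hys
    · rename_i hnlt
      simp only [decide_eq_true_eq] at hnlt
      rcases hp with _ | ⟨hy, hys⟩
      constructor
      · intro z hz
        rcases (PySem.List.mem_insertBy _ _ _ _).mp hz with hzx | hz'
        · subst hzx
          have := hs y (List.mem_cons_self)
          simp only [lexP]
          omega
        · exact hy z hz'
      · exact ih hys (fun a ha => hs a (List.mem_cons_of_mem _ ha))

lemma foldl_insertBy_pairwise_lex (l acc : List (Int × Int))
    (hacc : acc.Pairwise lexP)
    (hcross : ∀ a ∈ acc, ∀ b ∈ l, a.2 < b.2)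
    (hl : l.Pairwise (fun a b => a.2 < b.2)) :
    (l.foldl (fun acc x => PySem.List.insertBy (fun a b => decide (a.1 < b.1)) x acc) acc).Pairwise lexP := by
  induction l generalizing acc with
  | nil => exact hacc
  | cons x l' ih =>
    rcases hl with _ | ⟨hx, hl'⟩
    simp only [List.foldl_cons]
    apply ih
    · exact insertBy_pairwise_lex acc x hacc
        (fun a ha => hcross a ha x (List.mem_cons_self))
    · intro a ha b hb
      rcases (PySem.List.mem_insertBy _ _ _ _).mp ha with hax | ha'
      · subst hax; exact hx b hb
      · exact hcross a ha' b (List.mem_cons_of_mem _ hb)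
    · exact hl'

lemma sorted_fst_pairwise_lex (l : List (Int × Int))
    (hl : l.Pairwise (fun a b => a.2 < b.2)) :
    (PySem.List.sorted l (fun p => p.1)).Pairwise lexP := by
  rw [PySem.List.sorted_eq_foldl_insertBy]
  exact foldl_insertBy_pairwise_lex l [] (by simp) (by simp) hl

-- the heap loop of A agrees with the walk down any lexicographically sorted
-- rearrangement of the heap (indices distinct)
lemma loop_eq : ∀ (n : Nat) (h s : List (Int × Int)) (prev k : Int),
    h.length ≤ n → s.Perm h → s.Pairwise lexP → (h.map Prod.snd).Nodup →
    solALoop h prev (h.length : Int) k = walkGo s prev k := by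
  intro n
  induction n with
  | zero =>
    intro h s prev k hn hperm _ _
    have : h = [] := List.length_eq_zero_iff.mp (Nat.le_zero.mp hn)
    subst this
    have : s = [] := List.Perm.eq_nil hperm
    subst this
    simp [solALoop, walkGo]
  | succ n ih =>
    intro h s prev k hn hperm hpair hnd
    cases h with
    | nil =>
      have : s = [] := List.Perm.eq_nil hperm
      subst this
      simp [solALoop, walkGo]
    | cons x xs =>
      cases s with
      | nil => exact absurd (List.Perm.symm hperm) (by simp)
      | cons y s' =>
        set m := (pvPopMin x xs).1 with hm
        set rest := (pvPopMin x xs).2 with hrest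
        have hpm : (x :: xs).Perm (m :: rest) := popMin_perm x xs
        have hymem : y ∈ x :: xs := hperm.mem_iff.mp List.mem_cons_self
        have hym : ¬ lexP y m := popMin_min x xs y hymem
        have hmmem : m ∈ y :: s' := hperm.symm.mem_iff.mp (hpm.mem_iff.mpr List.mem_cons_self)
        have hyeq : y = m := by
          rcases List.mem_cons.mp hmmem with h1 | h1
          · exact h1.symm
          · rcases hpair with _ | ⟨hy, _⟩
            exact absurd (hy m h1) hym
        subst hyeq
        have hs' : s'.Perm rest := (hperm.trans hpm).cons_inv
        have hlen : ((x :: xs).length : Int) = (((m : Int × Int) :: s').length : Int) := by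
          simp [hperm.length_eq]
        have hrl : rest.length = xs.length := pvPopMin_length x xs
        have hnodr : ((m :: rest).map Prod.snd).Nodup := (hpm.map Prod.snd).nodup_iff.mp hnd
        rw [solALoop, walkGo]
        simp only [← hm, ← hrest]
        rw [← hlen]
        by_cases hc : (m.1 - prev) * ((x :: xs).length : Int) ≤ k
        · rw [if_pos hc, if_neg (by omega)]
          have hstep : ((x :: xs).length : Int) - 1 = (rest.length : Int) := by
            simp [hrl]
          rw [hstep]
          exact ih rest s' m.1 (k - (m.1 - prev) * ((x :: xs).length : Int))
            (by simp at hn; omega) hs' (List.Pairwise.sublist (by simp) hpair)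
            (List.Nodup.sublist (by simp) hnodr)
        · rw [if_neg hc, if_pos (by omega)]
          have hzperm : (PySem.List.sorted (m :: s') (fun q => q.2)).Perm (m :: s') :=
            PySem.List.sorted_perm _ _ _
          have hznod : ((PySem.List.sorted (m :: s') (fun q => q.2)).map Prod.snd).Nodup := by
            have h1 : ((m :: s').map Prod.snd).Nodup :=
              ((hperm.trans hpm).map Prod.snd).symm.nodup_iff.mp hnodr
            exact (hzperm.map Prod.snd).nodup_iff.mpr h1
          have hzlt : (PySem.List.sorted (m :: s') (fun q => q.2)).Pairwise
              (fun a b => a.2 < b.2) := by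
            have hle := PySem.List.sorted_pairwise (m :: s') (fun q => q.2)
            have hne : (PySem.List.sorted (m :: s') (fun q => q.2)).Pairwise
                (fun a b => a.2 ≠ b.2) := by
              rw [← List.pairwise_map (f := Prod.snd)]
              exact hznod
            exact (hle.and hne).imp (fun hab => lt_of_le_of_ne hab.1 hab.2)
          have heq : PySem.List.sorted (rest ++ [m]) (fun q => q.2) =
              PySem.List.sorted (m :: s') (fun q => q.2) := by
            apply PySem.List.sorted_eq_of_perm_of_pairwise_lt _ _ _ _ hzlt
            exact hzperm.trans ((hperm.trans hpm).trans
              (List.perm_append_comm (l₁ := [m]) (l₂ := rest)))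
          rw [heq]

-- ---- eatenTo facts ----

lemma eatenTo_eq_sum (ft : List Int) (r : Int) :
    eatenTo ft r = (ft.map (fun t => min t r)).sum := by
  unfold eatenTo
  rw [PySem.List.foldl_add ft (fun t => if t < r then t else r) 0]
  simp only [zero_add]
  congr 1
  apply List.map_congr_left
  intro t _
  simp only [min_def]
  split_ifs <;> omega

lemma eatenTo_mono (ft : List Int) {r r' : Int} (h : r ≤ r') :
    eatenTo ft r ≤ eatenTo ft r' := by
  rw [eatenTo_eq_sum, eatenTo_eq_sum]
  exact List.sum_le_sum (fun t _ => by omega)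

lemma eatenTo_succ (ft : List Int) (r : Int) :
    eatenTo ft (r + 1) = eatenTo ft r + ((ft.filter (fun t => decide (r < t))).length : Int) := by
  rw [eatenTo_eq_sum, eatenTo_eq_sum]
  induction ft with
  | nil => simp
  | cons t ft ih =>
    simp only [List.map_cons, List.sum_cons, List.filter_cons]
    by_cases h : r < t
    · simp only [h, decide_true, if_true, List.length_cons]
      push_cast
      omega
    · simp only [h, decide_false, Bool.false_eq_true, if_false]
      omega

lemma eatenTo_const (ft : List Int) (r : Int) (h : ∀ t ∈ ft, r ≤ t) :
    eatenTo ft r = (ft.length : Int) * r := by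
  rw [eatenTo_eq_sum, ← PySem.List.sum_map_const_int ft r]
  congr 1
  exact List.map_congr_left (fun t ht => by have := h t ht; omega)

lemma eatenTo_total (ft : List Int) (r : Int) (h : ∀ t ∈ ft, t ≤ r) :
    eatenTo ft r = ft.sum := by
  rw [eatenTo_eq_sum]
  have : ft.map (fun t => min t r) = ft.map id :=
    List.map_congr_left (fun t ht => by have := h t ht; simp; omega)
  rw [this, List.map_id]

-- ---- the walk characterised by the level r ----

-- bites consumed from state (s, prev) once every time in s is eaten down to level r
def Fp (s : List (Int × Int)) (prev r : Int) : Int :=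
  (s.map (fun x => min x.1 r)).sum - (s.length : Int) * prev

lemma Fp_mono (s : List (Int × Int)) (prev : Int) {r r' : Int} (h : r ≤ r') :
    Fp s prev r ≤ Fp s prev r' := by
  unfold Fp
  have h2 : ((s.map (fun x => min x.1 r)).sum : Int) ≤ (s.map (fun x => min x.1 r')).sum :=
    List.sum_le_sum (fun x _ => by omega)
  omega

lemma Fp_const (s : List (Int × Int)) (prev r : Int) (h : ∀ x ∈ s, r ≤ x.1) :
    Fp s prev r = (s.length : Int) * (r - prev) := by
  unfold Fp
  have : s.map (fun x => min x.1 r) = s.map (fun _ => r) :=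
    List.map_congr_left (fun x hx => by have := h x hx; omega)
  rw [this, PySem.List.sum_map_const_int]
  ring

lemma walk_neg : ∀ (s : List (Int × Int)) (prev k : Int), s.Pairwise lexP →
    (s.map (fun x => x.1)).sum - (s.length : Int) * prev ≤ k → walkGo s prev k = -1 := by
  intro s
  induction s with
  | nil => intro prev k _ _; simp [walkGo]
  | cons p rest ih =>
    intro prev k hpair htot
    rcases hpair with _ | ⟨hp, hrest⟩
    have hge : ∀ x ∈ rest, p.1 ≤ x.1 := by
      intro x hx
      have := hp x hx
      simp only [lexP] at this
      omega
    have hsum : ((rest.length : Int)) * p.1 ≤ (rest.map (fun x => x.1)).sum := by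
      rw [← PySem.List.sum_map_const_int rest p.1]
      exact List.sum_le_sum (fun x hx => hge x hx)
    simp only [List.map_cons, List.sum_cons, List.length_cons] at htot
    have heq : (rest.map (fun x => x.1)).sum - (rest.length : Int) * p.1
        = (p.1 + (rest.map (fun x => x.1)).sum - ((rest.length : Int) + 1) * prev)
          - (p.1 - prev) * ((rest.length : Int) + 1) := by ring
    simp only [walkGo, List.length_cons]
    rw [if_neg (by push_cast at htot ⊢; omega)]
    apply ih
    · exact hrest
    · push_cast at htot ⊢
      omega

lemma walk_spec : ∀ (s : List (Int × Int)) (prev k r : Int), s.Pairwise lexP →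
    Fp s prev r ≤ k → k < Fp s prev (r + 1) →
    walkGo s prev k =
      (PySem.List.pyGetD (PySem.List.sorted (s.filter (fun x => decide (r < x.1))) (fun q => q.2))
        (k - Fp s prev r) (0, 0)).2 := by
  intro s
  induction s with
  | nil => intro prev k r _ h1 h2; simp [Fp] at h1 h2; omega
  | cons p rest ih =>
    intro prev k r hpair h1 h2
    have hge : ∀ x ∈ p :: rest, p.1 ≤ x.1 := by
      intro x hx
      rcases List.mem_cons.mp hx with hx | hx
      · rw [hx]
      · rcases hpair with _ | ⟨hp, _⟩
        have := hp x hx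
        simp only [lexP] at this
        omega
    have hlen : (((p :: rest).length : Nat) : Int) = (rest.length : Int) + 1 := by
      simp
    have hneed : Fp (p :: rest) prev p.1 = (p.1 - prev) * ((rest.length : Int) + 1) := by
      rw [Fp_const _ _ _ hge, hlen]; ring
    by_cases hc : k < (p.1 - prev) * ((rest.length : Int) + 1)
    · have hrlt : r < p.1 := by
        by_contra hcon
        push_neg at hcon
        have := Fp_mono (p :: rest) prev hcon
        omega
      have hfr : Fp (p :: rest) prev r = ((rest.length : Int) + 1) * (r - prev) := by
        rw [Fp_const _ _ _ (fun x hx => by have := hge x hx; omega), hlen]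
      have hfr1 : Fp (p :: rest) prev (r + 1) = ((rest.length : Int) + 1) * (r + 1 - prev) := by
        rw [Fp_const _ _ _ (fun x hx => by have := hge x hx; omega), hlen]
      have hfilt : (p :: rest).filter (fun x => decide (r < x.1)) = p :: rest := by
        apply List.filter_eq_self.mpr
        intro x hx
        have := hge x hx
        simp only [decide_eq_true_eq]
        omega
      have hbounds : 0 ≤ k - Fp (p :: rest) prev r ∧
          k - Fp (p :: rest) prev r < (rest.length : Int) + 1 := by
        constructor
        · omega
        · have : Fp (p :: rest) prev (r+1) - Fp (p :: rest) prev r = (rest.length : Int) + 1 := by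
            rw [hfr, hfr1]; ring
          omega
      have hidx : PySem.Int.mod k (((p :: rest).length : Nat) : Int) = k - Fp (p :: rest) prev r := by
        rw [hlen, PySem.Int.mod_eq_emod_of_pos (by omega)]
        have hk : k = (k - Fp (p :: rest) prev r) + (r - prev) * ((rest.length : Int) + 1) := by
          rw [hfr]; ring
        calc k % ((rest.length : Int) + 1)
            = ((k - Fp (p :: rest) prev r) + (r - prev) * ((rest.length : Int) + 1)) % ((rest.length : Int) + 1) := by rw [← hk]
          _ = (k - Fp (p :: rest) prev r) % ((rest.length : Int) + 1) := by
              exact Int.add_mul_emod_self_right _ _ _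
          _ = k - Fp (p :: rest) prev r := Int.emod_eq_of_lt hbounds.1 hbounds.2
      simp only [walkGo]
      rw [if_pos (by rw [hlen]; exact hc), hfilt, hidx]
    · have hple : p.1 ≤ r := by
        by_contra hcon
        push_neg at hcon
        have h3 : r + 1 ≤ p.1 := by omega
        have := Fp_mono (p :: rest) prev h3
        omega
      have hstep : ∀ q : Int, p.1 ≤ q →
          Fp (p :: rest) prev q = (p.1 - prev) * ((rest.length : Int) + 1) + Fp rest p.1 q := by
        intro q hq
        unfold Fp
        simp only [List.map_cons, List.sum_cons, hlen]
        have : min p.1 q = p.1 := by omega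
        rw [this]
        ring
      have h1' : Fp rest p.1 r ≤ k - (p.1 - prev) * ((rest.length : Int) + 1) := by
        have := hstep r hple
        omega
      have h2' : k - (p.1 - prev) * ((rest.length : Int) + 1) < Fp rest p.1 (r + 1) := by
        have := hstep (r + 1) (by omega)
        omega
      have htail : rest.Pairwise lexP := by
        rcases hpair with _ | ⟨_, h⟩
        exact h
      have hfilt : (p :: rest).filter (fun x => decide (r < x.1)) =
          rest.filter (fun x => decide (r < x.1)) := by
        simp only [List.filter_cons, decide_eq_true_eq]
        rw [if_neg (by omega)]
      simp only [walkGo]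
      rw [if_neg (by rw [hlen]; exact hc), hlen]
      rw [ih p.1 (k - (p.1 - prev) * ((rest.length : Int) + 1)) r htail h1' h2']
      rw [hfilt]
      congr 1
      rw [hstep r hple]
      ring_nf

-- ---- binary search finds the level ----

lemma bs_spec : ∀ (n : Nat) (ft : List Int) (k lo hi : Int), (hi - lo).toNat ≤ n →
    eatenTo ft lo ≤ k → k < eatenTo ft hi → lo < hi →
    eatenTo ft (bsGo ft k lo hi) ≤ k ∧ k < eatenTo ft (bsGo ft k lo hi + 1) := by
  intro n
  induction n with
  | zero => intro ft k lo hi hn _ _ hlt; omega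
  | succ n ih =>
    intro ft k lo hi hn hlo hhi hlt
    rw [bsGo]
    by_cases hgap : 1 < hi - lo
    · rw [if_pos hgap]
      have hmid1 := (PySem.Int.le_floordiv_iff_mul_le (a := lo + hi) (b := 2) (q := lo + 1) (by omega)).mpr (by omega)
      have hmid2 := (PySem.Int.floordiv_lt_iff_lt_mul (a := lo + hi) (b := 2) (q := hi) (by omega)).mpr (by omega)
      by_cases hc : eatenTo ft (PySem.Int.floordiv (lo + hi) 2) ≤ k
      · simp only [hc, if_true]
        exact ih ft k _ hi (by omega) hc hhi (by omega)
      · simp only [hc, if_false]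
        exact ih ft k lo _ (by omega) hlo (by omega) (by omega)
    · rw [if_neg hgap]
      have : hi = lo + 1 := by omega
      subst this
      exact ⟨hlo, hhi⟩

-- ===== VERDICT (by name: the statement is the Claim_ definition above) =====
theorem solution_spec : Claim_equal_solution := by
  intro ft k _
  unfold Spec_solution solution solution_alt
  set pairs := (PySem.List.enumerate ft 0).map (fun q => (q.2, q.1 + 1)) with hpairs
  have hplen : pairs.length = ft.length := by
    simp [hpairs, PySem.List.length_enumerate]
  have hsnd : pairs.Pairwise (fun a b => a.2 < b.2) := by
    rw [hpairs, List.pairwise_map]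
    exact (PySem.List.pairwise_lt_enumerate ft 0).imp (fun hab => by omega)
  set s0 := PySem.List.sorted pairs (fun p => p.1) with hs0
  have hlex : s0.Pairwise lexP := sorted_fst_pairwise_lex pairs hsnd
  have hA : solALoop pairs 0 ((ft.length : Nat) : Int) k = walkGo s0 0 k := by
    rw [show (((ft.length : Nat)) : Int) = ((pairs.length : Nat) : Int) by rw [hplen]]
    exact loop_eq pairs.length pairs s0 0 k (le_refl _) (PySem.List.sorted_perm _ _ _)
      hlex (pairwise_snd_nodup hsnd)
  rw [hA]
  have hFp : ∀ r, Fp s0 0 r = eatenTo ft r := by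
    intro r
    unfold Fp
    rw [eatenTo_eq_sum]
    have hperm : (s0.map (fun x => min x.1 r)).Perm (pairs.map (fun x => min x.1 r)) :=
      (PySem.List.sorted_perm _ _ _).map _
    rw [hperm.sum_eq, hpairs, List.map_map]
    have hmm : (PySem.List.enumerate ft 0).map
        ((fun x : Int × Int => min x.1 r) ∘ (fun q : Int × Int => (q.2, q.1 + 1)))
        = ft.map (fun t => min t r) := by
      rw [show ((fun x : Int × Int => min x.1 r) ∘ (fun q : Int × Int => (q.2, q.1 + 1)))
          = ((fun t => min t r) ∘ (fun q : Int × Int => q.2)) from rfl, ← List.map_map,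
        PySem.List.map_snd_enumerate]
    rw [hmm]
    simp
  by_cases hnil : ft.length = 0
  · have hft : ft = [] := List.length_eq_zero_iff.mp hnil
    subst hft
    have hp0 : pairs = [] := by simp [hpairs, PySem.List.enumerate]
    have hs00 : s0 = [] := by rw [hs0, hp0]; rfl
    rw [hs00, if_pos hnil]
    simp [walkGo]
  · rw [if_neg hnil]
    obtain ⟨mxv, hmx⟩ : ∃ m, PySem.List.max? ft (fun t => t) = some m := by
      cases hmm : PySem.List.max? ft (fun t => t) with
      | none =>
        have := (PySem.List.max?_eq_none_iff _ _).mp hmm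
        subst this
        simp at hnil
      | some m => exact ⟨m, rfl⟩
    obtain ⟨mnv, hmn⟩ : ∃ m, PySem.List.min? ft (fun t => t) = some m := by
      cases hmm : PySem.List.min? ft (fun t => t) with
      | none =>
        have := (PySem.List.min?_eq_none_iff _ _).mp hmm
        subst this
        simp at hnil
      | some m => exact ⟨m, rfl⟩
    have hmax : ∀ t ∈ ft, t ≤ mxv := PySem.List.max?_isMax hmx
    have hmin : ∀ t ∈ ft, mnv ≤ t := PySem.List.min?_isMin hmn
    simp only [hmx, hmn, Option.getD_some]
    have hsum0 : (s0.map (fun x => x.1)).sum = ft.sum := by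
      have hperm : (s0.map (fun x => x.1)).Perm (pairs.map (fun x => x.1)) :=
        (PySem.List.sorted_perm _ _ _).map _
      rw [hperm.sum_eq, hpairs, List.map_map]
      rw [show ((fun x : Int × Int => x.1) ∘ (fun q : Int × Int => (q.2, q.1 + 1)))
          = (fun q : Int × Int => q.2) from rfl, PySem.List.map_snd_enumerate]
    by_cases hend : eatenTo ft mxv ≤ k
    · rw [if_pos hend]
      apply walk_neg s0 0 k hlex
      rw [hsum0, ← eatenTo_total ft mxv hmax]
      omega
    · rw [if_neg hend]
      have hnI : (0 : Int) < ((ft.length : Nat) : Int) := by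
        have : 0 < ft.length := Nat.pos_of_ne_zero hnil
        omega
      set nI : Int := ((ft.length : Nat) : Int) with hnIdef
      set lo0 : Int := min mnv (PySem.Int.floordiv k nI) with hlo0def
      have hlo0 : eatenTo ft lo0 ≤ k := by
        have hle : ∀ t ∈ ft, lo0 ≤ t := fun t ht =>
          le_trans (min_le_left _ _) (hmin t ht)
        rw [eatenTo_const ft lo0 hle, ← hnIdef]
        have h1 : nI * lo0 ≤ nI * PySem.Int.floordiv k nI :=
          mul_le_mul_of_nonneg_left (min_le_right _ _) (by omega)
        have h2 := PySem.Int.floordiv_mul_add_mod k nI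
        have h3 := PySem.Int.mod_nonneg k hnI
        have h4 : nI * PySem.Int.floordiv k nI = PySem.Int.floordiv k nI * nI :=
          mul_comm _ _
        omega
      have hend' : k < eatenTo ft mxv := by omega
      have hlo0lt : lo0 < mxv := by
        by_contra hcon
        push_neg at hcon
        have := eatenTo_mono ft hcon
        omega
      obtain ⟨hr1, hr2⟩ := bs_spec (mxv - lo0).toNat ft k lo0 mxv (le_refl _) hlo0 hend' hlo0lt
      set r : Int := bsGo ft k lo0 mxv with hrdef
      rw [walk_spec s0 0 k r hlex (by rw [hFp]; exact hr1) (by rw [hFp]; exact hr2), hFp]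
      have hsorted_eq : PySem.List.sorted (s0.filter (fun x => decide (r < x.1))) (fun q => q.2)
          = pairs.filter (fun x => decide (r < x.1)) := by
        apply PySem.List.sorted_eq_of_perm_of_pairwise_lt
        · exact ((PySem.List.sorted_perm pairs (fun p => p.1) false).filter _).symm
        · exact hsnd.filter _
      rw [hsorted_eq]
      have hmapfil : pairs.filter (fun x => decide (r < x.1))
          = ((PySem.List.enumerate ft 0).filter (fun q => decide (r < q.2))).map
              (fun q => (q.2, q.1 + 1)) := by
        rw [hpairs, List.filter_map]
        rfl
      have hlenfil : ((PySem.List.enumerate ft 0).filter (fun q => decide (r < q.2))).length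
          = (ft.filter (fun t => decide (r < t))).length := by
        conv_rhs => rw [← PySem.List.map_snd_enumerate ft 0, List.filter_map, List.length_map]
        rfl
      have hcnt := eatenTo_succ ft r
      have hj0 : 0 ≤ k - eatenTo ft r := by omega
      have hjlt : k - eatenTo ft r
          < (((PySem.List.enumerate ft 0).filter (fun q => decide (r < q.2))).length : Int) := by
        rw [hlenfil]
        omega
      rw [hmapfil]
      rw [PySem.List.pyGetD_eq_getElem _ _ hj0 (by rw [List.length_map]; exact hjlt)]
      rw [PySem.List.pyGetD_eq_getElem _ _ hj0 (by rw [List.length_map]; exact hjlt)]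
      rw [List.getElem_map, List.getElem_map]
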